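-- pv_equiv track=rewrite | github.com/Raggahmuff1n/Test | modules_diagram_generator.py | _categorize_services
-- ===== SOURCE A (Python) =====
-- from typing import Dict, List, Optional
--
-- def _categorize_services(services: List[Dict]) -> Dict:
--     """Categorize services by layer and function"""
--
--     categorized = {
--         "frontend": [],
--         "api_gateway": [],
--         "compute": [],
--         "containers": [],
--         "data": [],
--         "storage": [],
--         "ai_ml": [],
--         "integration": [],
--         "security": [],
--         "networking": [],
--         "monitoring": [],
--         "identity": []
--     }
--
--     for service in services:
--         category = service.get("category", "")
--         name = service.get("name", "")
--
--         # Map services to architectural layers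
--         if "CDN" in name or "Front Door" in name:
--             categorized["frontend"].append(service)
--         elif "API Management" in name or "Application Gateway" in name:
--             categorized["api_gateway"].append(service)
--         elif category == "Compute":
--             categorized["compute"].append(service)
--         elif category == "Containers":
--             categorized["containers"].append(service)
--         elif category == "Databases":
--             categorized["data"].append(service)
--         elif category == "Storage":
--             categorized["storage"].append(service)
--         elif "AI" in category or "Machine Learning" in category:
--             categorized["ai_ml"].append(service)
--         elif category == "Integration & Messaging":
--             categorized["integration"].append(service)
--         elif category == "Security & Identity":
--             if "Active Directory" in name:
--                 categorized["identity"].append(service)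
--             else:
--                 categorized["security"].append(service)
--         elif category == "Networking":
--             categorized["networking"].append(service)
--         elif category == "Monitoring & Management":
--             categorized["monitoring"].append(service)
--
--     return categorized
-- ===== SOURCE B (Python) =====
-- _CATEGORY_BUCKET = {
--     "Compute": "compute",
--     "Containers": "containers",
--     "Databases": "data",
--     "Storage": "storage",
--     "Integration & Messaging": "integration",
--     "Networking": "networking",
--     "Monitoring & Management": "monitoring",
-- }
--
-- _BUCKET_NAMES = (
--     "frontend", "api_gateway", "compute", "containers", "data", "storage",
--     "ai_ml", "integration", "security", "networking", "monitoring", "identity",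
-- )
--
--
-- def _bucket_key(category, name):
--     """Return the bucket for one service, or None to drop it."""
--     if "CDN" in name or "Front Door" in name:
--         return "frontend"
--     if "API Management" in name or "Application Gateway" in name:
--         return "api_gateway"
--     if category == "Security & Identity":
--         return "identity" if "Active Directory" in name else "security"
--     key = _CATEGORY_BUCKET.get(category)
--     if key is None and ("AI" in category or "Machine Learning" in category):
--         key = "ai_ml"
--     return key
--
--
-- def _categorize_services(services):
--     # Stage 1: classify every service once.
--     tagged = [(_bucket_key(s.get("category", ""), s.get("name", "")), s) for s in services]
--     # Stage 2: group -- one comprehension per bucket over the tagged list.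
--     return {k: [s for key, s in tagged if key == k] for k in _BUCKET_NAMES}
-- ===== Notes on version B (the rewrite author's own statement) =====
-- stated objective: alternative
-- what changed: Replaced A's single pass that mutates a dict of buckets with a two-stage classify-then-group pipeline: a pure classifier (name overrides, Security/Identity split, then one lookup table with an AI fallback) tags every service once, and the result dict is built by a comprehension that filters the tagged list per bucket instead of appending during the scan.
import Mathlib
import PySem

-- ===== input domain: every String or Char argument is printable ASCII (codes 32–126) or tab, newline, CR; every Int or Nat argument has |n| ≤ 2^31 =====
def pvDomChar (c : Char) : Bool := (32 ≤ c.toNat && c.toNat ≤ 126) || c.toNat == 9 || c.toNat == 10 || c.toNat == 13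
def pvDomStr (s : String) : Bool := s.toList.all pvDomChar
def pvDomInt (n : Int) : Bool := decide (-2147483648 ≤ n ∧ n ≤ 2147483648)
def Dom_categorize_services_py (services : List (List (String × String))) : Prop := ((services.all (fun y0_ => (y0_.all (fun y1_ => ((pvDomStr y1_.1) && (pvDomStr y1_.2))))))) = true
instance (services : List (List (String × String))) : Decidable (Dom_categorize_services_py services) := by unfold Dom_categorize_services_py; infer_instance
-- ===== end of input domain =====

-- B replaces A's single mutating-dict pass by a two-stage pipeline: classify each service once (pure classifier with a lookup table), then build each bucket by filtering the tagged list; objective: alternative decomposition.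


-- ===== PORT A =====
-- service.get(k, "")
def pvSvcGetD (service : List (String × String)) (k : String) : String :=
  (PySem.Dict.mk service).getD k ""

-- the initial `categorized` dict literal
def pvInitA : PySem.Dict String (List (List (String × String))) :=
  PySem.Dict.mk
    [("frontend", []), ("api_gateway", []), ("compute", []), ("containers", []),
     ("data", []), ("storage", []), ("ai_ml", []), ("integration", []),
     ("security", []), ("networking", []), ("monitoring", []), ("identity", [])]

-- the body of A's for-loop, one service
def pvStepA (d : PySem.Dict String (List (List (String × String))))
    (service : List (String × String)) : PySem.Dict String (List (List (String × String))) :=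
  let category := pvSvcGetD service "category"
  let name := pvSvcGetD service "name"
  if PySem.Str.isIn "CDN" name || PySem.Str.isIn "Front Door" name then
    d.modify "frontend" [] (· ++ [service])
  else if PySem.Str.isIn "API Management" name || PySem.Str.isIn "Application Gateway" name then
    d.modify "api_gateway" [] (· ++ [service])
  else if category == "Compute" then d.modify "compute" [] (· ++ [service])
  else if category == "Containers" then d.modify "containers" [] (· ++ [service])
  else if category == "Databases" then d.modify "data" [] (· ++ [service])
  else if category == "Storage" then d.modify "storage" [] (· ++ [service])
  else if PySem.Str.isIn "AI" category || PySem.Str.isIn "Machine Learning" category then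
    d.modify "ai_ml" [] (· ++ [service])
  else if category == "Integration & Messaging" then d.modify "integration" [] (· ++ [service])
  else if category == "Security & Identity" then
    if PySem.Str.isIn "Active Directory" name then d.modify "identity" [] (· ++ [service])
    else d.modify "security" [] (· ++ [service])
  else if category == "Networking" then d.modify "networking" [] (· ++ [service])
  else if category == "Monitoring & Management" then d.modify "monitoring" [] (· ++ [service])
  else d

def categorize_services_py (services : List (List (String × String))) :
    List (String × List (List (String × String))) :=
  (services.foldl pvStepA pvInitA).items

-- ===== PORT B =====
def pvCategoryBucket : PySem.Dict String String :=
  PySem.Dict.mk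
    [("Compute", "compute"), ("Containers", "containers"), ("Databases", "data"),
     ("Storage", "storage"), ("Integration & Messaging", "integration"),
     ("Networking", "networking"), ("Monitoring & Management", "monitoring")]

def pvBucketNames : List String :=
  ["frontend", "api_gateway", "compute", "containers", "data", "storage",
   "ai_ml", "integration", "security", "networking", "monitoring", "identity"]

-- _bucket_key(category, name)
def pvBucketKey (category name : String) : Option String :=
  if PySem.Str.isIn "CDN" name || PySem.Str.isIn "Front Door" name then some "frontend"
  else if PySem.Str.isIn "API Management" name || PySem.Str.isIn "Application Gateway" name then
    some "api_gateway"
  else if category == "Security & Identity" then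
    some (if PySem.Str.isIn "Active Directory" name then "identity" else "security")
  else
    match pvCategoryBucket.get? category with
    | some k => some k
    | none =>
        if PySem.Str.isIn "AI" category || PySem.Str.isIn "Machine Learning" category then
          some "ai_ml"
        else none

-- stage 1 (the `tagged` comprehension) then stage 2 (one filter per bucket)
def categorize_services_py_alt (services : List (List (String × String))) :
    List (String × List (List (String × String))) :=
  let tagged := services.map (fun s => (pvBucketKey (pvSvcGetD s "category") (pvSvcGetD s "name"), s))
  pvBucketNames.map (fun k => (k, (tagged.filter (fun p => p.1 == some k)).map Prod.snd))

-- ===== PRECONDITION & SPEC =====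
def Spec_categorize_services_py (services : List (List (String × String))) (out : List (String × List (List (String × String)))) : Prop := out = categorize_services_py_alt services
instance (services : List (List (String × String))) (out : List (String × List (List (String × String)))) : Decidable (Spec_categorize_services_py services out) := by unfold Spec_categorize_services_py; infer_instance

-- ===== CLAIM (what is proved, stated in full; the proofs are below) =====
def Claim_equal_categorize_services_py : Prop := ∀ (services : List (List (String × String))), Dom_categorize_services_py services → Spec_categorize_services_py services (categorize_services_py services)

-- ===== LEMMAS AND PROOFS =====
def pvKeyOf (s : List (String × String)) : Option String :=
  pvBucketKey (pvSvcGetD s "category") (pvSvcGetD s "name")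

theorem pvKey_mem (c n : String) (k : String) (h : pvBucketKey c n = some k) :
    k ∈ pvBucketNames := by
  have hrange : ∀ v, pvCategoryBucket.get? c = some v → v ∈ pvBucketNames := by
    intro v hv
    revert hv
    simp only [pvCategoryBucket, PySem.Dict.get?_mk_cons]
    split_ifs <;> intro hv
    all_goals first
      | (obtain rfl := Option.some.inj hv; decide)
      | (simp [PySem.Dict.get?] at hv)
  unfold pvBucketKey at h
  split_ifs at h with h1 h2 h3 h4 h5
  · obtain rfl := Option.some.inj h; decide
  · obtain rfl := Option.some.inj h; decide
  · obtain rfl := Option.some.inj h; decide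
  · obtain rfl := Option.some.inj h; decide
  · cases hg : pvCategoryBucket.get? c with
    | some v =>
        rw [hg] at h
        obtain rfl := Option.some.inj h
        exact hrange _ hg
    | none =>
        rw [hg] at h
        obtain rfl := Option.some.inj h
        decide
  · cases hg : pvCategoryBucket.get? c with
    | some v =>
        rw [hg] at h
        obtain rfl := Option.some.inj h
        exact hrange _ hg
    | none =>
        rw [hg] at h
        exact absurd (show (none : Option String) = some k from h) (by simp)

theorem pvStepA_match (d : PySem.Dict String (List (List (String × String))))
    (s : List (String × String)) :
    pvStepA d s =
      match pvKeyOf s with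
      | some k => d.modify k [] (· ++ [s])
      | none => d := by
  simp only [pvStepA, pvKeyOf, pvBucketKey]
  generalize pvSvcGetD s "category" = c
  generalize pvSvcGetD s "name" = n
  by_cases h1 : (PySem.Str.isIn "CDN" n || PySem.Str.isIn "Front Door" n) = true
  · rw [if_pos h1, if_pos h1]
  rw [if_neg h1, if_neg h1]
  by_cases h2 : (PySem.Str.isIn "API Management" n || PySem.Str.isIn "Application Gateway" n) = true
  · rw [if_pos h2, if_pos h2]
  rw [if_neg h2, if_neg h2]
  by_cases hC : c = "Compute"
  · subst hC
    rw [if_pos (show (("Compute" : String) == "Compute") = true from by decide),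
        if_neg (show ¬(("Compute" : String) == "Security & Identity") = true from by decide),
        show pvCategoryBucket.get? "Compute" = some "compute" from by decide]
  by_cases hCt : c = "Containers"
  · subst hCt
    rw [if_neg (show ¬(("Containers" : String) == "Compute") = true from by decide),
        if_pos (show (("Containers" : String) == "Containers") = true from by decide),
        if_neg (show ¬(("Containers" : String) == "Security & Identity") = true from by decide),
        show pvCategoryBucket.get? "Containers" = some "containers" from by decide]
  by_cases hD : c = "Databases"
  · subst hD
    rw [if_neg (show ¬(("Databases" : String) == "Compute") = true from by decide),
        if_neg (show ¬(("Databases" : String) == "Containers") = true from by decide),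
        if_pos (show (("Databases" : String) == "Databases") = true from by decide),
        if_neg (show ¬(("Databases" : String) == "Security & Identity") = true from by decide),
        show pvCategoryBucket.get? "Databases" = some "data" from by decide]
  by_cases hSt : c = "Storage"
  · subst hSt
    rw [if_neg (show ¬(("Storage" : String) == "Compute") = true from by decide),
        if_neg (show ¬(("Storage" : String) == "Containers") = true from by decide),
        if_neg (show ¬(("Storage" : String) == "Databases") = true from by decide),
        if_pos (show (("Storage" : String) == "Storage") = true from by decide),
        if_neg (show ¬(("Storage" : String) == "Security & Identity") = true from by decide),
        show pvCategoryBucket.get? "Storage" = some "storage" from by decide]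
  by_cases hI : c = "Integration & Messaging"
  · subst hI
    rw [if_neg (show ¬(("Integration & Messaging" : String) == "Compute") = true from by decide),
        if_neg (show ¬(("Integration & Messaging" : String) == "Containers") = true from by decide),
        if_neg (show ¬(("Integration & Messaging" : String) == "Databases") = true from by decide),
        if_neg (show ¬(("Integration & Messaging" : String) == "Storage") = true from by decide),
        if_neg (show ¬(PySem.Str.isIn "AI" "Integration & Messaging" || PySem.Str.isIn "Machine Learning" "Integration & Messaging") = true from by decide),
        if_pos (show (("Integration & Messaging" : String) == "Integration & Messaging") = true from by decide),
        if_neg (show ¬(("Integration & Messaging" : String) == "Security & Identity") = true from by decide),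
        show pvCategoryBucket.get? "Integration & Messaging" = some "integration" from by decide]
  by_cases hN : c = "Networking"
  · subst hN
    rw [if_neg (show ¬(("Networking" : String) == "Compute") = true from by decide),
        if_neg (show ¬(("Networking" : String) == "Containers") = true from by decide),
        if_neg (show ¬(("Networking" : String) == "Databases") = true from by decide),
        if_neg (show ¬(("Networking" : String) == "Storage") = true from by decide),
        if_neg (show ¬(PySem.Str.isIn "AI" "Networking" || PySem.Str.isIn "Machine Learning" "Networking") = true from by decide),
        if_neg (show ¬(("Networking" : String) == "Integration & Messaging") = true from by decide),
        if_neg (show ¬(("Networking" : String) == "Security & Identity") = true from by decide),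
        if_pos (show (("Networking" : String) == "Networking") = true from by decide),
        show pvCategoryBucket.get? "Networking" = some "networking" from by decide,
        if_neg (show ¬(("Networking" : String) == "Security & Identity") = true from by decide)]
  by_cases hM : c = "Monitoring & Management"
  · subst hM
    rw [if_neg (show ¬(("Monitoring & Management" : String) == "Compute") = true from by decide),
        if_neg (show ¬(("Monitoring & Management" : String) == "Containers") = true from by decide),
        if_neg (show ¬(("Monitoring & Management" : String) == "Databases") = true from by decide),
        if_neg (show ¬(("Monitoring & Management" : String) == "Storage") = true from by decide),
        if_neg (show ¬(PySem.Str.isIn "AI" "Monitoring & Management" || PySem.Str.isIn "Machine Learning" "Monitoring & Management") = true from by decide),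
        if_neg (show ¬(("Monitoring & Management" : String) == "Integration & Messaging") = true from by decide),
        if_neg (show ¬(("Monitoring & Management" : String) == "Security & Identity") = true from by decide),
        if_neg (show ¬(("Monitoring & Management" : String) == "Networking") = true from by decide),
        if_pos (show (("Monitoring & Management" : String) == "Monitoring & Management") = true from by decide),
        show pvCategoryBucket.get? "Monitoring & Management" = some "monitoring" from by decide,
        if_neg (show ¬(("Monitoring & Management" : String) == "Security & Identity") = true from by decide)]
  by_cases hS : c = "Security & Identity"
  · subst hS
    rw [if_neg (show ¬(("Security & Identity" : String) == "Compute") = true from by decide),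
        if_neg (show ¬(("Security & Identity" : String) == "Containers") = true from by decide),
        if_neg (show ¬(("Security & Identity" : String) == "Databases") = true from by decide),
        if_neg (show ¬(("Security & Identity" : String) == "Storage") = true from by decide),
        if_neg (show ¬(PySem.Str.isIn "AI" "Security & Identity" || PySem.Str.isIn "Machine Learning" "Security & Identity") = true from by decide),
        if_neg (show ¬(("Security & Identity" : String) == "Integration & Messaging") = true from by decide),
        if_pos (show (("Security & Identity" : String) == "Security & Identity") = true from by decide),
        if_pos (show (("Security & Identity" : String) == "Security & Identity") = true from by decide)]
    by_cases hAD : PySem.Str.isIn "Active Directory" n = true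
    · rw [if_pos hAD, if_pos hAD]
    · rw [if_neg hAD, if_neg hAD]
  have hget : pvCategoryBucket.get? c = none := by
    simp only [pvCategoryBucket, PySem.Dict.get?_mk_cons, beq_iff_eq,
      if_neg (Ne.symm hC), if_neg (Ne.symm hCt), if_neg (Ne.symm hD), if_neg (Ne.symm hSt),
      if_neg (Ne.symm hI), if_neg (Ne.symm hN), if_neg (Ne.symm hM)]
    simp [PySem.Dict.get?]
  rw [if_neg (show ¬((c == "Compute") = true) from by simp [hC]),
      if_neg (show ¬((c == "Containers") = true) from by simp [hCt]),
      if_neg (show ¬((c == "Databases") = true) from by simp [hD]),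
      if_neg (show ¬((c == "Storage") = true) from by simp [hSt]),
      if_neg (show ¬((c == "Security & Identity") = true) from by simp [hS]), hget]
  by_cases hAI : (PySem.Str.isIn "AI" c || PySem.Str.isIn "Machine Learning" c) = true
  · rw [if_pos hAI, if_pos hAI,
        if_neg (show ¬((c == "Security & Identity") = true) from by simp [hS])]
  rw [if_neg hAI, if_neg hAI,
      if_neg (show ¬((c == "Security & Identity") = true) from by simp [hS]),
      if_neg (show ¬((c == "Integration & Messaging") = true) from by simp [hI]),
      if_neg (show ¬((c == "Networking") = true) from by simp [hN]),
      if_neg (show ¬((c == "Monitoring & Management") = true) from by simp [hM])]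

theorem pvFold_eq_filterMap (l : List (List (String × String)))
    (d : PySem.Dict String (List (List (String × String)))) :
    l.foldl pvStepA d =
      (l.filterMap (fun s => (pvKeyOf s).map (fun k => (k, s)))).foldl
        (fun d p => d.modify p.1 [] (· ++ [p.2])) d := by
  induction l generalizing d with
  | nil => rfl
  | cons s rest ih =>
      rw [List.foldl_cons, pvStepA_match, List.filterMap_cons]
      cases h : pvKeyOf s with
      | none => simpa using ih d
      | some k => simpa using ih (d.modify k [] (· ++ [s]))

theorem pvFilter_tagged (l : List (List (String × String))) (k : String) :
    ((l.filterMap (fun s => (pvKeyOf s).map (fun k => (k, s)))).filter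
        (fun p => p.1 == k)).map (·.2)
      = ((l.map (fun s => (pvBucketKey (pvSvcGetD s "category") (pvSvcGetD s "name"), s))).filter
          (fun p => p.1 == some k)).map Prod.snd := by
  induction l with
  | nil => rfl
  | cons s rest ih =>
      rw [List.filterMap_cons, List.map_cons, List.filter_cons]
      cases h : pvKeyOf s with
      | none =>
          simp only [pvKeyOf] at h
          simp [h, ih]
      | some k' =>
          simp only [pvKeyOf] at h
          by_cases hk : k' = k
          · subst hk
            simp [h, ih]
          · simp [h, hk, ih]


theorem pvKeys_final (l : List (List (String × String))) :
    ((l.filterMap (fun s => (pvKeyOf s).map (fun k => (k, s)))).foldl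
        (fun d p => d.modify p.1 [] (· ++ [p.2])) pvInitA).keys = pvBucketNames := by
  rw [PySem.Dict.keys_foldl_modify_key (key := Prod.fst)]
  rw [PySem.Set.update_eq_append_filter]
  have hmem : ∀ x ∈ ((l.filterMap (fun s => (pvKeyOf s).map (fun k => (k, s)))).map Prod.fst),
      PySem.Set.contains pvInitA.keys x = true := by
    intro x hx
    obtain ⟨p, hp, rfl⟩ := List.mem_map.mp hx
    obtain ⟨s, _, hs⟩ := List.mem_filterMap.mp hp
    obtain ⟨k, hk, rfl⟩ := Option.map_eq_some_iff.mp hs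
    have := pvKey_mem _ _ _ hk
    rw [PySem.Set.contains_iff]
    simpa [pvInitA, PySem.Dict.keys, pvBucketNames] using this
  have : (PySem.Set.ofList ((l.filterMap (fun s => (pvKeyOf s).map (fun k => (k, s)))).map Prod.fst)).filter
      (fun y => !(PySem.Set.contains pvInitA.keys y)) = [] := by
    apply List.filter_eq_nil_iff.mpr
    intro y hy
    have hy' := (PySem.Set.mem_ofList _ _).mp hy
    have := hmem y hy'
    rw [PySem.Set.contains_iff] at this
    simp [this]
  rw [this, List.append_nil]
  decide



theorem pvGetD_of_all_nil {ν : Type} (dflt : ν) (k : String) (l : List (String × ν))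
    (hl : ∀ p ∈ l, p.2 = dflt) : (PySem.Dict.mk l).getD k dflt = dflt := by
  simp only [PySem.Dict.getD, PySem.Dict.get?]
  cases h : l.find? (fun p => p.1 == k) with
  | none => rfl
  | some p => simpa using hl p (List.mem_of_find?_eq_some h)

theorem pvItems_aux {ν : Type} (dflt : ν) (l : List (String × ν))
    (h : (l.map (·.1)).Nodup) :
    l = (l.map (·.1)).map
      (fun k => (k, ((l.find? (fun p => p.1 == k)).map (·.2)).getD dflt)) := by
  induction l with
  | nil => rfl
  | cons p rest ih =>
      obtain ⟨k, v⟩ := p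
      simp only [List.map_cons, List.nodup_cons, List.mem_map] at h
      obtain ⟨hk, hnd⟩ := h
      simp only [List.map_cons, List.find?_cons, beq_self_eq_true]
      refine List.cons_eq_cons.mpr ⟨rfl, ?_⟩
      conv_lhs => rw [ih hnd]
      apply List.map_congr_left
      intro k' hk'
      have hne : (k == k') = false := by
        simp only [beq_eq_false_iff_ne, ne_eq]
        rintro rfl
        exact hk ⟨_, List.mem_map.mp hk' |>.choose_spec.1, List.mem_map.mp hk' |>.choose_spec.2⟩
      rw [hne]

theorem pvItems_eq_keys_map {ν : Type} (d : PySem.Dict String ν) (dflt : ν)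
    (h : d.keys.Nodup) : d.items = d.keys.map (fun k => (k, d.getD k dflt)) := by
  obtain ⟨l⟩ := d
  simpa [PySem.Dict.keys, PySem.Dict.items, PySem.Dict.getD, PySem.Dict.get?]
    using pvItems_aux dflt l (by simpa [PySem.Dict.keys] using h)

theorem pvInitA_getD (k : String) : pvInitA.getD k [] = [] := by
  apply pvGetD_of_all_nil
  decide

theorem pvFinal (services : List (List (String × String))) :
    categorize_services_py services = categorize_services_py_alt services := by
  unfold categorize_services_py
  rw [pvFold_eq_filterMap]
  have hkeys := pvKeys_final services
  have hnd : ((services.filterMap (fun s => (pvKeyOf s).map (fun k => (k, s)))).foldl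
      (fun d p => d.modify p.1 [] (· ++ [p.2])) pvInitA).keys.Nodup := by
    rw [hkeys]; decide
  rw [pvItems_eq_keys_map _ [] hnd, hkeys]
  unfold categorize_services_py_alt
  apply List.map_congr_left
  intro k _
  rw [PySem.Dict.getD_foldl_modify_append, pvInitA_getD, List.nil_append, pvFilter_tagged]

-- ===== VERDICT (by name: the statement is the Claim_ definition above) =====
theorem categorize_services_py_spec : Claim_equal_categorize_services_py := by
  intro services _
  unfold Spec_categorize_services_py
  exact pvFinal services
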